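-- pv_equiv track=rewrite | github.com/sc22hb/agent-preference-negotiation-scheduler | streamlit_app.py | preference_strength_categorical
-- ===== SOURCE A (Python) =====
-- def preference_strength_categorical(prefs):
--     strength = 0
--     if prefs.get('Day_Preference') not in ["Don't Care", "Either (Mon or Tue) is fine"]:
--         strength += 1
--     for f in ['F2F', 'Teams']:
--         if prefs.get(f) != 'Dont Care':
--             strength += 1
--     if prefs.get('Time') != 'Anytime':
--         strength += 1
--     return strength
-- ===== SOURCE B (Python) =====
-- WEAK_PAIRS = {
--     ('Day_Preference', "Don't Care"),
--     ('Day_Preference', "Either (Mon or Tue) is fine"),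
--     ('F2F', 'Dont Care'),
--     ('Teams', 'Dont Care'),
--     ('Time', 'Anytime'),
-- }
--
-- def preference_strength_categorical(prefs):
--     # Complement counting: start from the maximum strength (4 constrained
--     # fields) and subtract 1 for every stored (field, value) pair that is weak.
--     strength = 4
--     for item in prefs.items():
--         if item in WEAK_PAIRS:
--             strength -= 1
--     return strength
-- ===== Notes on version B (the rewrite author's own statement) =====
-- stated objective: alternative
-- what changed: Counts by complement over the data instead of probing the spec: B starts at the maximum strength 4 and makes one pass over the dict's items, subtracting 1 for each (field, value) pair found in a fixed set of weak pairs, whereas A looks up each of the four fields and adds 1 per non-weak answer (missing keys never subtract, matching A's +1 for them).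
import Mathlib
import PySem

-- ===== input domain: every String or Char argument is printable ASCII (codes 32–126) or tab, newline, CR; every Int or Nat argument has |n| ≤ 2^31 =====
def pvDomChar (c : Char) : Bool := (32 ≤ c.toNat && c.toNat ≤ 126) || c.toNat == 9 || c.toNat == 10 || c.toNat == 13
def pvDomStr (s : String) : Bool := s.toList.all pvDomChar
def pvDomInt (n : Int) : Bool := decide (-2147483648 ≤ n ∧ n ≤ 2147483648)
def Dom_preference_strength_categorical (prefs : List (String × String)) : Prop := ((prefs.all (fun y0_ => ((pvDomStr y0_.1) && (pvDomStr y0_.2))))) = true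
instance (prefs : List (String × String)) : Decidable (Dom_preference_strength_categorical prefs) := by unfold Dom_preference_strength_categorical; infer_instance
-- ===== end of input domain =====

-- B counts by complement over the dict's items rather than probing the four fields; return values proved equal.

-- ===== PORT A =====
def preference_strength_categorical (prefs : List (String × String)) : Int :=
  let d := PySem.Dict.ofList prefs
  let strength : Int := 0
  let strength := if ([some "Don't Care", some "Either (Mon or Tue) is fine"]).contains (d.get? "Day_Preference") then strength else strength + 1
  let strength := ["F2F", "Teams"].foldl (fun s f => if d.get? f ≠ some "Dont Care" then s + 1 else s) strength
  let strength := if d.get? "Time" ≠ some "Anytime" then strength + 1 else strength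
  strength

-- ===== PORT B =====
-- the set of weak (field, value) pairs
def pvWeakPairs : List (String × String) :=
  [("Day_Preference", "Don't Care"), ("Day_Preference", "Either (Mon or Tue) is fine"),
   ("F2F", "Dont Care"), ("Teams", "Dont Care"), ("Time", "Anytime")]

def preference_strength_categorical_alt (prefs : List (String × String)) : Int :=
  let d := PySem.Dict.ofList prefs
  d.items.foldl (fun s item => if pvWeakPairs.contains item then s - 1 else s) 4

-- ===== PRECONDITION & SPEC =====
def Spec_preference_strength_categorical (prefs : List (String × String)) (out : Int) : Prop := out = preference_strength_categorical_alt prefs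
instance (prefs : List (String × String)) (out : Int) : Decidable (Spec_preference_strength_categorical prefs out) := by unfold Spec_preference_strength_categorical; infer_instance

-- ===== CLAIM (what is proved, stated in full; the proofs are below) =====
def Claim_equal_preference_strength_categorical : Prop := ∀ (prefs : List (String × String)), Dom_preference_strength_categorical prefs → Spec_preference_strength_categorical prefs (preference_strength_categorical prefs)

-- ===== LEMMAS AND PROOFS =====

-- B's subtracting fold is 4 minus the count of weak items
theorem pv_foldl_sub (l : List (String × String)) (s : Int) :
    l.foldl (fun s item => if pvWeakPairs.contains item then s - 1 else s) s
      = s - (l.countP (fun item => pvWeakPairs.contains item) : Int) := by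
  induction l generalizing s with
  | nil => simp
  | cons p t ih =>
    rw [List.foldl_cons, ih, List.countP_cons]
    cases h : pvWeakPairs.contains p
    · simp
    · simp
      omega

-- per-element identity: a pair's weak-pair membership is the sum of its four field indicators
theorem pv_head (k v : String) :
    (if pvWeakPairs.contains (k, v) = true then (1 : Nat) else 0)
      = (if (k == "Day_Preference" && (v == "Don't Care" || v == "Either (Mon or Tue) is fine")) = true then 1 else 0)
      + (if (k == "F2F" && v == "Dont Care") = true then 1 else 0)
      + (if (k == "Teams" && v == "Dont Care") = true then 1 else 0)
      + (if (k == "Time" && v == "Anytime") = true then 1 else 0) := by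
  by_cases h1 : k = "Day_Preference" <;> by_cases h2 : k = "F2F" <;>
    by_cases h3 : k = "Teams" <;> by_cases h4 : k = "Time" <;>
    by_cases w1 : v = "Don't Care" <;> by_cases w2 : v = "Either (Mon or Tue) is fine" <;>
    by_cases w3 : v = "Dont Care" <;> by_cases w4 : v = "Anytime" <;>
    simp_all [pvWeakPairs]

-- the weak-pair count splits into the four per-field counts
theorem pv_count_split (l : List (String × String)) :
    l.countP (fun item => pvWeakPairs.contains item)
      = l.countP (fun p => p.1 == "Day_Preference" && (p.2 == "Don't Care" || p.2 == "Either (Mon or Tue) is fine"))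
      + l.countP (fun p => p.1 == "F2F" && p.2 == "Dont Care")
      + l.countP (fun p => p.1 == "Teams" && p.2 == "Dont Care")
      + l.countP (fun p => p.1 == "Time" && p.2 == "Anytime") := by
  induction l with
  | nil => simp
  | cons p t ih =>
    obtain ⟨k, v⟩ := p
    simp only [List.countP_cons, ih]
    rw [pv_head]
    omega

-- per-field count over a nodup-keyed items list is the lookup indicator
theorem pv_perkey (K : String) (W : String → Bool) :
    ∀ (l : List (String × String)), (l.map Prod.fst).Nodup →
      ((l.countP (fun p => p.1 == K && W p.2) : Int)
        = match (PySem.Dict.mk l).get? K with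
          | some v => if W v then (1 : Int) else 0
          | none => 0) := by
  intro l
  induction l with
  | nil => intro _; simp [PySem.Dict.get?]
  | cons p t ih =>
    intro hnd
    obtain ⟨k, v⟩ := p
    simp only [List.map_cons, List.nodup_cons] at hnd
    rw [List.countP_cons, PySem.Dict.get?_mk_cons]
    by_cases hk : k = K
    · subst hk
      have hz : t.countP (fun p => p.1 == k && W p.2) = 0 := by
        apply List.countP_eq_zero.2
        intro q hq
        have : q.1 ≠ k := fun h => hnd.1 (h ▸ List.mem_map_of_mem hq)
        simp [this]
      by_cases hw : W v = true <;> simp [hz, hw]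
    · have hne : (k == K) = false := by simp [hk]
      simpa [hne] using ih hnd.2

theorem pv_mk_items (d : PySem.Dict String String) : PySem.Dict.mk d.items = d := rfl

-- ===== VERDICT (by name: the statement is the Claim_ definition above) =====
theorem preference_strength_categorical_spec : Claim_equal_preference_strength_categorical := by
  intro prefs _
  unfold Spec_preference_strength_categorical preference_strength_categorical
    preference_strength_categorical_alt
  simp only [List.foldl, List.contains_cons, List.contains_nil]
  set d := PySem.Dict.ofList prefs with hd
  have hnd : (d.items.map Prod.fst).Nodup := PySem.Dict.nodup_keys_ofList prefs
  rw [pv_foldl_sub, pv_count_split]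
  have e1 := pv_perkey "Day_Preference"
    (fun s => s == "Don't Care" || s == "Either (Mon or Tue) is fine") d.items hnd
  have e2 := pv_perkey "F2F" (fun s => s == "Dont Care") d.items hnd
  have e3 := pv_perkey "Teams" (fun s => s == "Dont Care") d.items hnd
  have e4 := pv_perkey "Time" (fun s => s == "Anytime") d.items hnd
  rw [pv_mk_items] at e1 e2 e3 e4
  push_cast
  rw [e1, e2, e3, e4]
  cases h1 : d.get? "Day_Preference" <;> cases h2 : d.get? "F2F" <;>
    cases h3 : d.get? "Teams" <;> cases h4 : d.get? "Time" <;>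
    simp_all <;> split_ifs <;> simp_all
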